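-- pv_equiv track=rewrite | github.com/RamyaVemula23/VoiceAnalytics | Ops/ML Ops/saabmleval/httpscriptadheranceeval/__init__.py | get_speaker_C_count
-- ===== SOURCE A (Python) =====
-- def get_speaker_C_count(section_spk_list,pred_labels_list):
--     labels = {}
--     spk_2_count = 0
--     spk_1_count = 0
--     for i in list(zip(section_spk_list,pred_labels_list)):
--         if ((i[0] == 2) and (i[1] == 'C')):
--             spk_2_count += 1
--         elif ((i[0]==1 and (i[1]=='C'))):
--             spk_1_count += 1
--     labels['Spk_2_C_Count'] = spk_2_count
--     labels['Spk_1_C_Count'] = spk_1_count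
--     return labels
-- ===== SOURCE B (Python) =====
-- def get_speaker_C_count(section_spk_list, pred_labels_list):
--     # Stage 1: project out the speakers of all 'C'-labelled positions.
--     c_speakers = [spk for spk, lab in zip(section_spk_list, pred_labels_list) if lab == 'C']
--     # Stage 2: per-speaker occurrence counts over that projected list.
--     return {'Spk_2_C_Count': c_speakers.count(2),
--             'Spk_1_C_Count': c_speakers.count(1)}
-- ===== Notes on version B (the rewrite author's own statement) =====
-- stated objective: alternative
-- what changed: Replaces A's single conditional-increment loop over two counters with a staged pipeline: first filter-and-project the speakers at 'C'-labelled positions into an intermediate list, then obtain each count with a separate list.count pass over that list.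
import Mathlib
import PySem

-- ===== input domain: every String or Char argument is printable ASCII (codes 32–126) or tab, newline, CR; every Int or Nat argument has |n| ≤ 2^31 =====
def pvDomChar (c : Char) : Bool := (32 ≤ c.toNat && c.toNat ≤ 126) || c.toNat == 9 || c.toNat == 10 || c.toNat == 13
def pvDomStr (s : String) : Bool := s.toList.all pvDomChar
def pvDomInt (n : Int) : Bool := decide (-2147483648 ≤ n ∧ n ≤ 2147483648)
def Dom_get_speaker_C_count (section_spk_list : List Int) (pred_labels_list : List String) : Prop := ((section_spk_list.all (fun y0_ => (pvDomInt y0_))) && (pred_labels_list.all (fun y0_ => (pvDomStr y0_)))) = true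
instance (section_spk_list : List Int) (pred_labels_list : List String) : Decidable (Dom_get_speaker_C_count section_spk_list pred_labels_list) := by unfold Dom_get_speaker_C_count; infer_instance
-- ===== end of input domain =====

-- B is an alternative staged decomposition (filter-project, then two count passes); same cost, no speed claim.

-- ===== PORT A =====
-- Port of A: one pass over zip with two accumulators (spk_2_count, spk_1_count), branches in A's order.
def get_speaker_C_count (section_spk_list : List Int) (pred_labels_list : List String) : List (String × Int) :=
  let counts :=
    (section_spk_list.zip pred_labels_list).foldl
      (fun (acc : Int × Int) i =>
        if i.1 == 2 && i.2 == "C" then (acc.1 + 1, acc.2)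
        else if i.1 == 1 && i.2 == "C" then (acc.1, acc.2 + 1)
        else acc)
      (0, 0)
  [("Spk_2_C_Count", counts.1), ("Spk_1_C_Count", counts.2)]

-- ===== PORT B =====
-- Port of B: filter the zipped pairs to those labelled "C", project the speakers, then count 2 and 1.
def get_speaker_C_count_alt (section_spk_list : List Int) (pred_labels_list : List String) : List (String × Int) :=
  let c_speakers :=
    ((section_spk_list.zip pred_labels_list).filter (fun i => i.2 == "C")).map Prod.fst
  [("Spk_2_C_Count", PySem.List.count c_speakers (2 : Int)),
   ("Spk_1_C_Count", PySem.List.count c_speakers (1 : Int))]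

-- ===== PRECONDITION & SPEC =====
def Spec_get_speaker_C_count (section_spk_list : List Int) (pred_labels_list : List String) (out : List (String × Int)) : Prop := out = get_speaker_C_count_alt section_spk_list pred_labels_list
instance (section_spk_list : List Int) (pred_labels_list : List String) (out : List (String × Int)) : Decidable (Spec_get_speaker_C_count section_spk_list pred_labels_list out) := by unfold Spec_get_speaker_C_count; infer_instance

-- ===== CLAIM =====
def Claim_equal_get_speaker_C_count : Prop := ∀ (section_spk_list : List Int) (pred_labels_list : List String), Dom_get_speaker_C_count section_spk_list pred_labels_list → Spec_get_speaker_C_count section_spk_list pred_labels_list (get_speaker_C_count section_spk_list pred_labels_list)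

-- ===== LEMMAS AND PROOFS =====

-- A's fold computes the pair counts of (2,"C") and (1,"C") in the zipped list.
theorem pv_fold_counts (z : List (Int × String)) (a b : Int) :
    z.foldl
      (fun (acc : Int × Int) i =>
        if i.1 == 2 && i.2 == "C" then (acc.1 + 1, acc.2)
        else if i.1 == 1 && i.2 == "C" then (acc.1, acc.2 + 1)
        else acc)
      (a, b)
    = (a + z.count (2, "C"), b + z.count (1, "C")) := by
  induction z generalizing a b with
  | nil => simp
  | cons h t ih =>
    rw [List.foldl_cons, List.count_cons, List.count_cons]
    by_cases h2 : (h.1 == (2 : Int) && h.2 == "C") = true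
    · rw [if_pos h2, ih]
      have he : h = ((2 : Int), "C") := by
        simp only [Bool.and_eq_true, beq_iff_eq] at h2; exact Prod.ext h2.1 h2.2
      subst he
      refine Prod.ext (by simp; try ring) (by simp; try ring)
    · rw [if_neg h2]
      by_cases h1 : (h.1 == (1 : Int) && h.2 == "C") = true
      · rw [if_pos h1, ih]
        have he : h = ((1 : Int), "C") := by
          simp only [Bool.and_eq_true, beq_iff_eq] at h1; exact Prod.ext h1.1 h1.2
        subst he
        refine Prod.ext (by simp; try ring) (by simp; try ring)
      · rw [if_neg h1, ih]
        have ne2 : h ≠ ((2 : Int), "C") := by rintro rfl; exact h2 (by simp)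
        have ne1 : h ≠ ((1 : Int), "C") := by rintro rfl; exact h1 (by simp)
        simp [ne1, ne2]

-- Counting (k,"C") pairs equals counting k among the speakers of "C"-labelled positions.
theorem pv_count_filter_map (z : List (Int × String)) (k : Int) :
    (z.count (k, "C") : Int)
      = ((z.filter (fun i => i.2 == "C")).map Prod.fst).count k := by
  induction z with
  | nil => simp
  | cons h t ih =>
    by_cases hc : h.2 = "C"
    · by_cases hk : h.1 = k
      · have he : h = (k, "C") := Prod.ext hk hc
        subst he
        simp [ih]
      · have ne : h ≠ (k, "C") := by rintro rfl; exact hk rfl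
        simp [hc, hk, ne, ih]
    · have ne : h ≠ (k, "C") := by rintro rfl; exact hc rfl
      simp [hc, ne, ih]

-- ===== VERDICT =====
theorem get_speaker_C_count_spec : Claim_equal_get_speaker_C_count := by
  intro s p _
  show get_speaker_C_count s p = get_speaker_C_count_alt s p
  simp only [get_speaker_C_count, get_speaker_C_count_alt, pv_fold_counts,
    PySem.List.count_eq, ← pv_count_filter_map]
  simp
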